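-- pv_equiv track=rewrite | github.com/vedang-kamat/line-coding-schemes | line_coding.py | biphases_encode
-- ===== SOURCE A (Python) =====
-- def biphases_encode(bits):
--     """Biphase-S: transition at start; extra transition for 0"""
--     encoded, prev = [], 0
--     for b in bits:
--         prev = 0 if prev == 1 else 1
--         encoded.append(prev)
--         if b == 0:
--             prev = 0 if prev == 1 else 1
--         encoded.append(prev)
--     return encoded
-- ===== SOURCE B (Python) =====
-- def biphases_encode(bits):
--     """Biphase-S by closed form: the k-th emitted half-level is the parity of
--     (number of transitions up to it) = (bit index + 1 + zeros seen so far)."""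
--     zeros, z = [], 0
--     for b in bits:
--         z += 1 if b == 0 else 0
--         zeros.append(z)
--     return [sym
--             for i, (b, z) in enumerate(zip(bits, zeros))
--             for sym in (((i + 1 + z) % 2) ^ (1 if b == 0 else 0),
--                         (i + 1 + z) % 2)]
-- ===== Notes on version B (the rewrite author's own statement) =====
-- stated objective: alternative
-- what changed: Replaces A's sequential level-toggling state machine by a closed-form arithmetic encoding: a prefix table of zero counts, then each half-bit symbol computed directly as the parity (i+1+zeros)%2 of the number of transitions before it (first symbol derived from the second by XOR with the zero flag), with no running signal level.
import Mathlib
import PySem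

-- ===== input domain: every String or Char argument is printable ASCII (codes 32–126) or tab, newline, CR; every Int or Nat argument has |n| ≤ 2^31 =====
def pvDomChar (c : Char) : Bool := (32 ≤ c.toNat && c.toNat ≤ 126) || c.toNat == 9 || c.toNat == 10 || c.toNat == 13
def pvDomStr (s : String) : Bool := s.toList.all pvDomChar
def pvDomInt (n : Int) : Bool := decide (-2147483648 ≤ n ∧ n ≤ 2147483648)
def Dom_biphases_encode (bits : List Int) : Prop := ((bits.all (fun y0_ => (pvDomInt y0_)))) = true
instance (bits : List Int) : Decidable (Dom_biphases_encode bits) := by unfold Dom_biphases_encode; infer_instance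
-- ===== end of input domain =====

-- B computes each half-bit symbol by the closed-form parity (i+1+zeros)%2 of the transition
-- count before it (zero counts tabulated in a first pass), instead of A's running toggled level.
-- ===== PORT A =====
-- loop body of A: toggles prev, appends, extra toggle+append for a 0 bit
def biphases_goA : List Int → Int → List Int
  | [], _ => []
  | b :: rest, prev =>
    let p1 : Int := if prev = 1 then 0 else 1
    let p2 : Int := if b = 0 then (if p1 = 1 then 0 else 1) else p1
    p1 :: p2 :: biphases_goA rest p2

def biphases_encode (bits : List Int) : List Int := biphases_goA bits 0

-- ===== PORT B =====
-- first pass of Source B: running prefix counts of zero bits (zeros list)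
def biphases_zeros : List Int → Int → List Int
  | [], _ => []
  | b :: rest, z =>
    let z' : Int := z + (if b = 0 then 1 else 0)
    z' :: biphases_zeros rest z'

-- second pass of Source B: the comprehension over enumerate(zip(bits, zeros)); i is the enumerate index
def biphases_emit : List (Int × Int) → Int → List Int
  | [], _ => []
  | (b, z) :: rest, i =>
    let second : Int := PySem.Int.mod (i + 1 + z) 2
    PySem.Int.bxor second (if b = 0 then 1 else 0) :: second :: biphases_emit rest (i + 1)

def biphases_encode_alt (bits : List Int) : List Int :=
  biphases_emit (bits.zip (biphases_zeros bits 0)) 0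

-- ===== PRECONDITION & SPEC =====
def Spec_biphases_encode (bits : List Int) (out : List Int) : Prop := out = biphases_encode_alt bits
instance (bits : List Int) (out : List Int) : Decidable (Spec_biphases_encode bits out) := by unfold Spec_biphases_encode; infer_instance

-- ===== CLAIM =====
def Claim_equal_biphases_encode : Prop := ∀ (bits : List Int), Dom_biphases_encode bits → Spec_biphases_encode bits (biphases_encode bits)

-- ===== LEMMAS AND PROOFS =====
lemma biphases_mod2 (a : Int) : PySem.Int.mod a 2 = a % 2 :=
  PySem.Int.mod_eq_emod_of_pos (by norm_num)

lemma biphases_key (bits : List Int) :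
    ∀ i z : Int,
      biphases_goA bits ((i + z) % 2) = biphases_emit (bits.zip (biphases_zeros bits z)) i := by
  induction bits with
  | nil => intro i z; rfl
  | cons b rest ih =>
    intro i z
    by_cases hb : b = 0 <;> rcases Int.emod_two_eq (i + z) with h | h
    · have h2 : (i + 1 + (z + 1)) % 2 = 0 := by omega
      simp only [biphases_goA, biphases_zeros, List.zip_cons_cons, biphases_emit,
        biphases_mod2, hb, h, h2, if_true]
      norm_num [PySem.Int.bxor]
      have h3 := ih (i + 1) (z + 1)
      rw [h2] at h3
      simpa using h3
    · have h2 : (i + 1 + (z + 1)) % 2 = 1 := by omega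
      simp only [biphases_goA, biphases_zeros, List.zip_cons_cons, biphases_emit,
        biphases_mod2, hb, h, h2, if_true]
      norm_num [PySem.Int.bxor]
      have h3 := ih (i + 1) (z + 1)
      rw [h2] at h3
      simpa using h3
    · have h2 : (i + 1 + z) % 2 = 1 := by omega
      simp only [biphases_goA, biphases_zeros, List.zip_cons_cons, biphases_emit,
        biphases_mod2, hb, h, if_false]
      norm_num [PySem.Int.bxor]
      have h3 := ih (i + 1) z
      rw [h2] at h3
      refine ⟨by rw [h2]; norm_num, by omega, h3⟩
    · have h2 : (i + 1 + z) % 2 = 0 := by omega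
      simp only [biphases_goA, biphases_zeros, List.zip_cons_cons, biphases_emit,
        biphases_mod2, hb, h, if_false]
      norm_num [PySem.Int.bxor]
      have h3 := ih (i + 1) z
      rw [h2] at h3
      refine ⟨by rw [h2]; norm_num, by omega, h3⟩

-- ===== VERDICT =====
theorem biphases_encode_spec : Claim_equal_biphases_encode := by
  intro bits _
  unfold Spec_biphases_encode biphases_encode biphases_encode_alt
  have := biphases_key bits 0 0
  simpa using this
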